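-- pv_equiv track=rewrite | github.com/saifibolte/CLI-Chatbot-using-Hugging-Face | interface.py | postprocess_reply
-- ===== SOURCE A (Python) =====
-- def postprocess_reply(prompt, generated):
--     """
--     Clean up the generated text by removing the input prompt and stop sequences.
--
--     Language models often return the full input prompt plus the generated text.
--     This function extracts only the new generated content and removes unwanted
--     continuation patterns.
--
--     Args:
--         prompt (str): The original input prompt sent to the model
--         generated (str): The full text returned by the model
--
--     Returns:
--         str: Cleaned assistant response with prompt and stop tokens removed
--     """
--     # Remove the original prompt from the generated text if present
--     if generated.startswith(prompt):
--         text = generated[len(prompt):]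
--     else:
--         text = generated
--
--     # Define stop sequences that indicate end of assistant response
--     # These patterns often appear when models continue generating unintended content
--     stops = ["</s>", "<|endoftext|>", "<|assistant|>", "<|user|>", "\nUser:", "\nSystem:", "\nAssistant:"]
--
--     # Find the first occurrence of any stop sequence and truncate there
--     for s in stops:
--         idx = text.find(s)
--         if idx != -1 and idx > 0: # Found and not at the very beginning
--             text = text[:idx]
--     return text.strip()
-- ===== SOURCE B (Python) =====
-- def postprocess_reply(prompt, generated):
--     # Strip the echoed prompt, then cut once at the smallest qualifying stop index.
--     if generated.startswith(prompt):
--         text = generated[len(prompt):]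
--     else:
--         text = generated
--     stops = ["</s>", "<|endoftext|>", "<|assistant|>", "<|user|>", "\nUser:", "\nSystem:", "\nAssistant:"]
--     cuts = [i for i in (text.find(s) for s in stops) if i > 0]
--     if cuts:
--         text = text[:min(cuts)]
--     return text.strip()
-- ===== Notes on version B (the rewrite author's own statement) =====
-- stated objective: alternative
-- what changed: A repeatedly truncates the working text inside an order-dependent loop over the stop sequences; B scans the fixed stripped text once, collects all positive find indices, and truncates a single time at their minimum.
import Mathlib
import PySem

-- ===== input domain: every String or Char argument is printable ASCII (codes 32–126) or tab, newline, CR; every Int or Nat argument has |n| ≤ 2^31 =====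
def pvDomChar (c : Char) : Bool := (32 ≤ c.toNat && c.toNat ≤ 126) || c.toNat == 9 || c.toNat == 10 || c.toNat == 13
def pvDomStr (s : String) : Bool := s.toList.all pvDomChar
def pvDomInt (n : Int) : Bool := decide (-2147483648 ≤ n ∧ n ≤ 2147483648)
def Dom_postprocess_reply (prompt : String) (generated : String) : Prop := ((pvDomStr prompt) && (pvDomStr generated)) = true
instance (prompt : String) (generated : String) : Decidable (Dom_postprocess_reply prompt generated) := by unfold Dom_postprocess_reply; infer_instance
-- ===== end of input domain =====

-- B replaces A's order-dependent repeated-truncation loop over the stop list by a single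
-- gather-all-find-indices pass followed by one truncation at their minimum (objective: alternative).

-- ===== PORT A =====
-- the stop sequences, as lists of chars (shared constant data of both Pythons)
def pvStops : List (List Char) :=
  ["</s>".toList, "<|endoftext|>".toList, "<|assistant|>".toList, "<|user|>".toList,
   "\nUser:".toList, "\nSystem:".toList, "\nAssistant:".toList]

-- the body of A's `for s in stops` loop: find, then truncate if found and not at the start
def pvCutA (t : List Char) (s : List Char) : List Char :=
  let idx := PySem.Chars.find t s
  if idx ≠ -1 ∧ 0 < idx then PySem.List.slice t none (some idx) else t

def postprocess_reply (prompt : String) (generated : String) : String :=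
  let text : List Char :=
    if PySem.Str.startswith generated prompt then
      PySem.List.slice generated.toList (some (prompt.toList.length : Int)) none
    else generated.toList
  String.ofList (PySem.Chars.strip (pvStops.foldl pvCutA text))

-- ===== PORT B =====
def postprocess_reply_alt (prompt : String) (generated : String) : String :=
  let text : List Char :=
    if PySem.Str.startswith generated prompt then
      PySem.List.slice generated.toList (some (prompt.toList.length : Int)) none
    else generated.toList
  let cuts : List Int := (pvStops.map (fun s => PySem.Chars.find text s)).filter (fun i => decide (0 < i))
  let text2 : List Char :=
    if cuts ≠ [] then PySem.List.slice text none (some (PySem.List.minD cuts (fun i => i) 0))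
    else text
  String.ofList (PySem.Chars.strip text2)

-- ===== PRECONDITION & SPEC =====
def Spec_postprocess_reply (prompt : String) (generated : String) (out : String) : Prop := out = postprocess_reply_alt prompt generated
instance (prompt : String) (generated : String) (out : String) : Decidable (Spec_postprocess_reply prompt generated out) := by unfold Spec_postprocess_reply; infer_instance

-- ===== CLAIM (what is proved, stated in full; the proofs are below) =====
def Claim_equal_postprocess_reply : Prop := ∀ (prompt : String) (generated : String), Dom_postprocess_reply prompt generated → Spec_postprocess_reply prompt generated (postprocess_reply prompt generated)

-- ===== LEMMAS AND PROOFS =====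

-- the Nat shadow of A's loop step: the cut position after processing stop s
def pvPStep (t : List Char) (p : Nat) (s : List Char) : Nat :=
  if 0 < PySem.Chars.find t s then min p (PySem.Chars.find t s).toNat else p

-- loop invariant: the current text is t.take p, and p is t.length or points at a stop-initial char
def pvInv (t : List Char) (p : Nat) : Prop :=
  p ≤ t.length ∧ (p = t.length ∨ ∃ h : p < t.length, t[p] = '<' ∨ t[p] = '\n')

-- shape of every stop sequence: nonempty, starts with '<' or '\n', and neither char recurs later
def pvGood (s : List Char) : Bool :=
  !s.isEmpty && (s.head! == '<' || s.head! == '\n') && s.tail.all (fun c => c != '<' && c != '\n')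

lemma pv_occ_bound {s t : List Char} {n : Nat} (hs : s ≠ []) (h : s <+: t.drop n) :
    n + s.length ≤ t.length := by
  have h1 := h.length_le
  have h2 : 0 < s.length := List.length_pos_iff.mpr hs
  simp [List.length_drop] at h1
  omega

lemma pv_prefix_drop_take {s t : List Char} (hs : s ≠ []) (p j : Nat) :
    s <+: (t.take p).drop j ↔ s <+: t.drop j ∧ j + s.length ≤ p := by
  rw [List.drop_take, List.prefix_take_iff]
  have h2 : 0 < s.length := List.length_pos_iff.mpr hs
  constructor
  · rintro ⟨h1, h3⟩; exact ⟨h1, by omega⟩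
  · rintro ⟨h1, h3⟩; exact ⟨h1, by omega⟩

lemma pv_infix_of_prefix_drop {s t : List Char} {j : Nat} (h : s <+: t.drop j) : s <:+: t :=
  (PySem.Chars.isIn_iff_infix s t).mp
    ((PySem.Chars.exists_prefix_drop_iff_isIn s t).mp ⟨j, h⟩)

-- find on a prefix: the global first occurrence if it fits, otherwise -1
lemma pv_find_take (t s : List Char) (hs : s ≠ []) (p : Nat) :
    PySem.Chars.find (t.take p) s =
      if 0 ≤ PySem.Chars.find t s ∧ (PySem.Chars.find t s).toNat + s.length ≤ p
      then PySem.Chars.find t s else -1 := by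
  split_ifs with hfit
  · obtain ⟨hq0, hqp⟩ := hfit
    obtain ⟨hocc, hmin⟩ := PySem.Chars.find_spec hq0
    have hocc' : s <+: (t.take p).drop (PySem.Chars.find t s).toNat :=
      (pv_prefix_drop_take hs p _).mpr ⟨hocc, hqp⟩
    have hq'0 : 0 ≤ PySem.Chars.find (t.take p) s :=
      (PySem.Chars.find_nonneg_iff _ _).mpr (pv_infix_of_prefix_drop hocc')
    obtain ⟨hocc2, hmin2⟩ := PySem.Chars.find_spec hq'0
    have hocc2' : s <+: t.drop (PySem.Chars.find (t.take p) s).toNat :=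
      ((pv_prefix_drop_take hs p _).mp hocc2).1
    have hle1 : (PySem.Chars.find t s).toNat ≤ (PySem.Chars.find (t.take p) s).toNat := by
      by_contra hlt
      exact hmin _ (by omega) hocc2'
    have hle2 : (PySem.Chars.find (t.take p) s).toNat ≤ (PySem.Chars.find t s).toNat := by
      by_contra hlt
      exact hmin2 _ (by omega) hocc'
    omega
  · rw [PySem.Chars.find_eq_neg_one_iff]
    intro hinf
    obtain ⟨j, hj⟩ := (PySem.Chars.exists_prefix_drop_iff_isIn s (t.take p)).mpr
      ((PySem.Chars.isIn_iff_infix s (t.take p)).mpr hinf)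
    obtain ⟨hj1, hj2⟩ := (pv_prefix_drop_take hs p j).mp hj
    have hq0 : 0 ≤ PySem.Chars.find t s :=
      (PySem.Chars.find_nonneg_iff _ _).mpr (pv_infix_of_prefix_drop hj1)
    obtain ⟨hocc, hmin⟩ := PySem.Chars.find_spec hq0
    have : (PySem.Chars.find t s).toNat ≤ j := by
      by_contra hlt
      exact hmin _ (by omega) hj1
    have := List.length_pos_iff.mpr hs
    exact hfit ⟨hq0, by omega⟩

lemma pv_head_eq {s : List Char} (h : 0 < s.length) : s.head! = s[0] := by
  cases s with
  | nil => simp at h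
  | cons a l => simp [List.head!]

-- one step of A's loop, on the Nat shadow
lemma pv_step (t s : List Char) (p : Nat) (hg : pvGood s = true) (hi : pvInv t p) :
    pvCutA (t.take p) s = t.take (pvPStep t p s) ∧ pvInv t (pvPStep t p s) := by
  obtain ⟨hp, hw⟩ := hi
  simp only [pvGood, List.all_eq_true, Bool.and_eq_true, Bool.or_eq_true, Bool.not_eq_eq_eq_not,
    Bool.not_true, List.isEmpty_eq_false_iff, beq_iff_eq, bne_iff_ne, ne_eq] at hg
  obtain ⟨⟨hs, hhead⟩, htail⟩ := hg
  have hslen : 0 < s.length := List.length_pos_iff.mpr hs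
  by_cases hq : 0 < PySem.Chars.find t s
  · have hq0 : 0 ≤ PySem.Chars.find t s := le_of_lt hq
    obtain ⟨hocc, hmin⟩ := PySem.Chars.find_spec hq0
    have hbound : (PySem.Chars.find t s).toNat + s.length ≤ t.length := pv_occ_bound hs hocc
    by_cases hfit : (PySem.Chars.find t s).toNat + s.length ≤ p
    · -- the occurrence fits the current prefix: cut there
      have hfind := pv_find_take t s hs p
      rw [if_pos ⟨hq0, hfit⟩] at hfind
      have hqlt : (PySem.Chars.find t s).toNat < p := by omega
      constructor
      · simp only [pvCutA, hfind, pvPStep, if_pos hq]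
        rw [if_pos ⟨by omega, hq⟩, PySem.List.slice_to _ hq0, List.take_take]
        congr 1
        omega
      · simp only [pvPStep, if_pos hq]
        refine ⟨by omega, Or.inr ⟨by omega, ?_⟩⟩
        have hget : s[0]'hslen = t[min p (PySem.Chars.find t s).toNat]'(by omega) := by
          rw [hocc.getElem hslen]
          rw [List.getElem_drop]
          congr 1
          omega
        rw [← hget, ← pv_head_eq hslen]
        exact hhead
    · -- the occurrence does not fit: A finds nothing in the prefix, and p is already left of it
      have hfind := pv_find_take t s hs p
      rw [if_neg (by intro h; exact hfit h.2)] at hfind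
      have hple : p ≤ (PySem.Chars.find t s).toNat := by
        by_contra hgt
        -- p would fall strictly inside the occurrence of s, so t[p] is a late char of s
        rcases hw with hw | ⟨hlt, hc⟩
        · omega
        · have hj2 : p - (PySem.Chars.find t s).toNat < s.length := by omega
          have hsp : s[p - (PySem.Chars.find t s).toNat]'hj2 = t[p]'hlt := by
            rw [hocc.getElem hj2, List.getElem_drop]
            congr 1
            omega
          have hmem : s[p - (PySem.Chars.find t s).toNat]'hj2 ∈ s.tail := by
            have heq : s[p - (PySem.Chars.find t s).toNat]'hj2
                = (s.drop 1)[p - (PySem.Chars.find t s).toNat - 1]'(by simp; omega) := by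
              rw [List.getElem_drop]
              congr 1
              omega
            rw [heq]
            simp only [List.drop_one]
            exact List.getElem_mem _
          have := htail _ hmem
          rw [hsp] at this
          tauto
      constructor
      · simp only [pvCutA, hfind, pvPStep, if_pos hq]
        rw [if_neg (by simp)]
        congr 1
        omega
      · simp only [pvPStep, if_pos hq]
        have hm : min p (PySem.Chars.find t s).toNat = p := by omega
        rw [hm]
        exact ⟨hp, hw⟩
  · -- not found, or found at index 0: no cut either way
    have hfind := pv_find_take t s hs p
    constructor
    · simp only [pvCutA, pvPStep, if_neg hq]
      split_ifs at hfind with hc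
      · rw [hfind, if_neg (by intro h; exact hq h.2)]
      · rw [hfind, if_neg (by simp)]
    · simp only [pvPStep, if_neg hq]
      exact ⟨hp, hw⟩

lemma pv_loop (t : List Char) (stops : List (List Char)) :
    ∀ p : Nat, (∀ s ∈ stops, pvGood s = true) → pvInv t p →
    stops.foldl pvCutA (t.take p) = t.take (stops.foldl (pvPStep t) p) := by
  induction stops with
  | nil => intro p _ _; rfl
  | cons s ss ih =>
      intro p hg hi
      have hgs : pvGood s = true := hg s (List.mem_cons_self ..)
      obtain ⟨h1, h2⟩ := pv_step t s p hgs hi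
      simpa [List.foldl_cons, h1] using ih (pvPStep t p s) (fun x hx => hg x (List.mem_cons_of_mem _ hx)) h2

-- the Nat shadow takes the min with every positive find index
lemma pv_pfold_cuts (t : List Char) (stops : List (List Char)) :
    ∀ p : Nat, stops.foldl (pvPStep t) p =
      ((stops.map (fun s => PySem.Chars.find t s)).filter (fun i => decide (0 < i))).foldl
        (fun p i => min p i.toNat) p := by
  induction stops with
  | nil => intro p; rfl
  | cons s ss ih =>
      intro p
      by_cases h : 0 < PySem.Chars.find t s
      · simp [pvPStep, h, ih]
      · simp [pvPStep, h, ih]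

lemma pv_min?_cons : ∀ (ys : List Int) (x : Int), PySem.List.min? (x::ys) (fun i : Int => i) = some (ys.foldl (fun m y => if y < m then y else m) x) := by
  intro ys
  induction ys with
  | nil => intro x; rfl
  | cons y ys ih =>
      intro x
      by_cases hyx : y < x
      · rw [show PySem.List.min? (x::y::ys) (fun i : Int => i) = PySem.List.min? (y::ys) (fun i : Int => i) from by
          simp [PySem.List.min?, hyx], ih]
        simp [hyx]
      · rw [show PySem.List.min? (x::y::ys) (fun i : Int => i) = PySem.List.min? (x::ys) (fun i : Int => i) from by
          simp [PySem.List.min?, hyx], ih]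
        simp [hyx]

lemma pv_minD_cons (x : Int) (ys : List Int) :
    PySem.List.minD (x :: ys) (fun i => i) 0 = ys.foldl (fun m y => if y < m then y else m) x := by
  simp [PySem.List.minD, pv_min?_cons]

lemma pv_fold_min_nat (xs : List Int) : ∀ (p : Nat) (a : Int), 0 < a → (∀ x ∈ xs, 0 < x) →
    xs.foldl (fun p i => min p i.toNat) (min p a.toNat)
      = min p (xs.foldl (fun m y => if y < m then y else m) a).toNat := by
  induction xs with
  | nil => intro p a _ _; rfl
  | cons y ys ih =>
      intro p a ha hpos
      have hy : 0 < y := hpos y (List.mem_cons_self ..)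
      simp only [List.foldl_cons]
      rw [show min (min p a.toNat) y.toNat = min p (if y < a then y else a).toNat by
        split_ifs with h <;> omega]
      exact ih p _ (by split_ifs <;> omega) (fun x hx => hpos x (List.mem_cons_of_mem _ hx))

-- the core equivalence, on the shared prompt-stripped text
lemma pv_core (t : List Char) :
    pvStops.foldl pvCutA t =
      (if ((pvStops.map (fun s => PySem.Chars.find t s)).filter (fun i => decide (0 < i))) ≠ [] then
        PySem.List.slice t none
          (some (PySem.List.minD ((pvStops.map (fun s => PySem.Chars.find t s)).filter (fun i => decide (0 < i))) (fun i => i) 0))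
      else t) := by
  have hgood : ∀ s ∈ pvStops, pvGood s = true := by decide
  have hinv : pvInv t t.length := ⟨le_refl _, Or.inl rfl⟩
  have hA : pvStops.foldl pvCutA t = t.take (pvStops.foldl (pvPStep t) t.length) := by
    conv_lhs => rw [← List.take_length (l := t)]
    exact pv_loop t pvStops t.length hgood hinv
  rw [hA, pv_pfold_cuts]
  rcases hce : ((pvStops.map (fun s => PySem.Chars.find t s)).filter (fun i => decide (0 < i))) with _ | ⟨x, ys⟩
  · simp
  · have hpos : ∀ y ∈ x :: ys, (0:Int) < y := by
      intro y hy
      rw [← hce] at hy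
      simpa using (List.mem_filter.mp hy).2
    have hx : (0:Int) < x := hpos x (List.mem_cons_self ..)
    have hm : 0 < ys.foldl (fun m y => if y < m then y else m) x := by
      have hmem := PySem.List.minD_mem (x :: ys) (fun i => i) 0 (by simp)
      rw [pv_minD_cons] at hmem
      exact hpos _ hmem
    rw [if_pos (by simp), pv_minD_cons, PySem.List.slice_to _ (le_of_lt hm)]
    simp only [List.foldl_cons]
    rw [pv_fold_min_nat ys t.length x hx (fun z hz => hpos z (List.mem_cons_of_mem _ hz))]
    rw [min_comm, ← List.take_take, List.take_length]

-- ===== VERDICT (by name: the statement is the Claim_ definition above) =====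
theorem postprocess_reply_spec : Claim_equal_postprocess_reply := by
  intro prompt generated _
  unfold Spec_postprocess_reply postprocess_reply postprocess_reply_alt
  have h := pv_core (if PySem.Str.startswith generated prompt then
      PySem.List.slice generated.toList (some (prompt.toList.length : Int)) none
    else generated.toList)
  split_ifs at h ⊢ with h1 h2 <;> simp_all
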